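-- pv_equiv track=rewrite | github.com/Chandrima-04/HMM_Viterbi_AT_CG_region_Detection | HMM-Exam.py | states_and_segment
-- ===== SOURCE A (Python) =====
-- def states_and_segment(sequence):
--     AT, GC, AT_seg, GC_seg = 0,0,0,0
--     prev = -1
--     if sequence[1]==0:
--         AT_seg +=1
--     else:
--         GC_seg +=1
--     for i in range(len(sequence)):
--         if sequence[i]==0:
--             AT +=1
--         else:
--             GC +=1
--         if sequence[i]==1 and prev==0:
--             GC_seg +=1
--         elif sequence[i]==0 and prev==1:
--             AT_seg +=1
--         prev = sequence[i]
--     return AT, GC, AT_seg, GC_seg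
-- ===== SOURCE B (Python) =====
-- def states_and_segment(sequence):
--     # index-set approach: build the sets of positions holding 0 and holding 1,
--     # then count transitions by membership tests on successor positions
--     zeros = {i for i, x in enumerate(sequence) if x == 0}
--     ones = {i for i, x in enumerate(sequence) if x == 1}
--     AT = len(zeros)
--     GC = len(sequence) - AT
--     if sequence[1] == 0:
--         AT_seg, GC_seg = 1, 0
--     else:
--         AT_seg, GC_seg = 0, 1
--     GC_seg += sum(1 for i in zeros if i + 1 in ones)
--     AT_seg += sum(1 for i in ones if i + 1 in zeros)
--     return AT, GC, AT_seg, GC_seg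
-- ===== Notes on version B (the rewrite author's own statement) =====
-- stated objective: alternative
-- what changed: Replaces A's single stateful scan carrying a prev variable by an index-set algorithm: build the sets of positions holding 0 and holding 1, read the base counts off the set sizes, and count transitions by testing whether the successor position i+1 of each position in one set lies in the other set.
import Mathlib
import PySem

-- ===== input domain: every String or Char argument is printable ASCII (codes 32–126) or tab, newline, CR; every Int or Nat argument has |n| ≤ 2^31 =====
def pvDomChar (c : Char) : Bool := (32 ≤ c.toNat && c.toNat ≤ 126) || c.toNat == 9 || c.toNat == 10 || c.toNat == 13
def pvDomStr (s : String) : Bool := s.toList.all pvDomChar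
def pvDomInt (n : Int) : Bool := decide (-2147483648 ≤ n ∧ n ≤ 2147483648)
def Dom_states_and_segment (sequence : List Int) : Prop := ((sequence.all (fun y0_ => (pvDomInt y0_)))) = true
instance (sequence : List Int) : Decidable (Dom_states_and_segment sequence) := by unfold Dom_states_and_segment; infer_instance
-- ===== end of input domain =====

-- B replaces A's single stateful scan (prev variable) by an index-set algorithm: position
-- sets for 0 and 1, sizes give the counts, successor-membership tests give the transitions.

-- ===== PORT A =====
-- one step of A's for-loop: state (AT, GC, AT_seg, GC_seg, prev)
def saslA_body (s : Int × Int × Int × Int × Int) (x : Int) : Int × Int × Int × Int × Int :=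
  let (AT, GC, ATs, GCs, prev) := s
  let AT := if x == 0 then AT + 1 else AT
  let GC := if x == 0 then GC else GC + 1
  let (ATs, GCs) :=
    if x == 1 && prev == 0 then (ATs, GCs + 1)
    else if x == 0 && prev == 1 then (ATs + 1, GCs)
    else (ATs, GCs)
  (AT, GC, ATs, GCs, x)

def states_and_segment (sequence : List Int) : Int × Int × Int × Int :=
  -- sequence[1] raises IndexError for length < 2; Pre_ excludes that, so the .getD 0 is never used
  let seed : Int := (PySem.List.pyGet? sequence 1).getD 0
  let init : Int × Int × Int × Int × Int :=
    if seed == 0 then (0, 0, 1, 0, -1) else (0, 0, 0, 1, -1)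
  let st := sequence.foldl saslA_body init
  (st.1, st.2.1, st.2.2.1, st.2.2.2.1)

-- ===== PORT B =====
def states_and_segment_alt (sequence : List Int) : Int × Int × Int × Int :=
  -- {i for i, x in enumerate(sequence) if x == v}
  let zeros : PySem.Set Int :=
    PySem.Set.ofList ((PySem.List.enumerate sequence).filterMap
      (fun p => if p.2 == 0 then some p.1 else none))
  let ones : PySem.Set Int :=
    PySem.Set.ofList ((PySem.List.enumerate sequence).filterMap
      (fun p => if p.2 == 1 then some p.1 else none))
  let AT : Int := PySem.Set.len zeros
  let GC : Int := (sequence.length : Int) - AT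
  let seed : Int := (PySem.List.pyGet? sequence 1).getD 0
  let (ATs, GCs) : Int × Int := if seed == 0 then (1, 0) else (0, 1)
  -- sum(1 for i in zeros if i + 1 in ones): an order-independent count over the set
  let GCs : Int := GCs + zeros.foldl (fun acc i => if PySem.Set.contains ones (i + 1) then acc + 1 else acc) 0
  let ATs : Int := ATs + ones.foldl (fun acc i => if PySem.Set.contains zeros (i + 1) then acc + 1 else acc) 0
  (AT, GC, ATs, GCs)

-- ===== PRECONDITION & SPEC =====
-- Pre_ excludes only lists of length < 2, on which Python A raises IndexError at sequence[1]
def Pre_states_and_segment (sequence : List Int) : Prop := 2 ≤ sequence.length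
instance (sequence : List Int) : Decidable (Pre_states_and_segment sequence) := by unfold Pre_states_and_segment; infer_instance
def pvWitness_states_and_segment : List Int := [0, 1, 0]

def Spec_states_and_segment (sequence : List Int) (out : Int × Int × Int × Int) : Prop := out = states_and_segment_alt sequence
instance (sequence : List Int) (out : Int × Int × Int × Int) : Decidable (Spec_states_and_segment sequence out) := by unfold Spec_states_and_segment; infer_instance

-- ===== CLAIM =====
def Claim_equal_states_and_segment : Prop := ∀ (sequence : List Int), Dom_states_and_segment sequence → Pre_states_and_segment sequence → Spec_states_and_segment sequence (states_and_segment sequence)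

-- ===== LEMMAS AND PROOFS =====

-- number of adjacent (0,1) pairs / (1,0) pairs, as a Nat
def c01 : List Int → Nat
  | x :: y :: t => (if x = 0 ∧ y = 1 then 1 else 0) + c01 (y :: t)
  | _ => 0
def c10 : List Int → Nat
  | x :: y :: t => (if x = 1 ∧ y = 0 then 1 else 0) + c10 (y :: t)
  | _ => 0

-- the (k-based) positions of value v in a list
def idxOf (v k : Int) : List Int → List Int
  | [] => []
  | x :: t => if x = v then k :: idxOf v (k + 1) t else idxOf v (k + 1) t

lemma idxOf_ge (v : Int) : ∀ (xs : List Int) (k : Int), ∀ j ∈ idxOf v k xs, k ≤ j := by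
  intro xs
  induction xs with
  | nil => intro k j h; simp [idxOf] at h
  | cons x t ih =>
    intro k j h
    simp only [idxOf] at h
    split at h
    · rcases List.mem_cons.mp h with rfl | h
      · exact le_refl _
      · have := ih (k + 1) j h; omega
    · have := ih (k + 1) j h; omega

lemma idxOf_nodup (v : Int) : ∀ (xs : List Int) (k : Int), (idxOf v k xs).Nodup := by
  intro xs
  induction xs with
  | nil => intro k; simp [idxOf]
  | cons x t ih =>
    intro k
    simp only [idxOf]
    split
    · refine List.nodup_cons.mpr ⟨fun h => ?_, ih (k + 1)⟩
      have := idxOf_ge v t (k + 1) k h; omega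
    · exact ih (k + 1)

lemma idxOf_length (v : Int) : ∀ (xs : List Int) (k : Int), (idxOf v k xs).length = xs.count v := by
  intro xs
  induction xs with
  | nil => intro k; simp [idxOf]
  | cons x t ih =>
    intro k
    by_cases h : x = v
    · simp [idxOf, h, ih (k + 1), List.count_cons]
    · simp [idxOf, h, ih (k + 1), List.count_cons]

lemma mem_idxOf_self (v k : Int) (xs : List Int) :
    k ∈ idxOf v k xs ↔ ∃ t, xs = v :: t := by
  constructor
  · intro h
    match xs with
    | [] => simp [idxOf] at h
    | x :: t =>
      simp only [idxOf] at h
      split at h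
      · rename_i hx; exact ⟨t, by rw [hx]⟩
      · have := idxOf_ge v t (k + 1) k h; omega
  · rintro ⟨t, rfl⟩
    simp [idxOf]

-- the filterMap in port B computes idxOf
lemma filterMap_enumerate_eq_idxOf (v k : Int) (xs : List Int) :
    (PySem.List.enumerate xs k).filterMap (fun p => if p.2 == v then some p.1 else none)
      = idxOf v k xs := by
  induction xs generalizing k with
  | nil => simp [idxOf, PySem.List.enumerate_nil]
  | cons x t ih =>
    simp only [PySem.List.enumerate_cons, List.filterMap_cons, idxOf]
    by_cases h : x = v
    · rw [if_pos (by simp [h]), if_pos h, ih (k + 1)]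
    · rw [if_neg (by simp [h]), if_neg h, ih (k + 1)]

-- counting fold = countP
lemma foldl_count_eq_countP (P : Int → Bool) (l : List Int) (acc : Int) :
    l.foldl (fun acc i => if P i then acc + 1 else acc) acc = acc + (l.countP P : Int) := by
  induction l generalizing acc with
  | nil => simp
  | cons x t ih =>
    simp only [List.foldl_cons, List.countP_cons, ih]
    by_cases h : P x <;> simp [h] <;> push_cast <;> ring

-- the successor-membership count over the position sets equals the adjacent-pair count
lemma countP_idxOf_eq_c01 (u v : Int) (huv : u ≠ v)
    (c : List Int → Nat)
    (hc : ∀ x y t, c (x :: y :: t) = (if x = u ∧ y = v then 1 else 0) + c (y :: t))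
    (hc1 : ∀ x, c [x] = 0) (hc0 : c [] = 0) :
    ∀ (xs : List Int) (k : Int),
      (idxOf u k xs).countP (fun i => decide ((i + 1) ∈ idxOf v k xs)) = c xs := by
  intro xs
  induction xs with
  | nil => intro k; simp [idxOf, hc0]
  | cons x t ih =>
    intro k
    have hmem : ∀ i ∈ idxOf u (k + 1) t,
        decide ((i + 1) ∈ idxOf v k (x :: t)) = decide ((i + 1) ∈ idxOf v (k + 1) t) := by
      intro i hi
      have hgi := idxOf_ge u t (k + 1) i hi
      simp only [idxOf]
      split
      · simp only [List.mem_cons, decide_eq_decide]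
        constructor
        · rintro (h | h)
          · omega
          · exact h
        · exact Or.inr
      · rfl
    have htail : (idxOf u (k + 1) t).countP (fun i => decide ((i + 1) ∈ idxOf v k (x :: t)))
        = c t := by
      rw [List.countP_congr (fun i hi => by rw [hmem i hi])]
      exact ih (k + 1)
    by_cases hxu : x = u
    · have hxv : x ≠ v := by rw [hxu]; exact huv
      have hvk : idxOf v k (x :: t) = idxOf v (k + 1) t := by simp [idxOf, hxv]
      have hu : idxOf u k (x :: t) = k :: idxOf u (k + 1) t := by simp [idxOf, hxu]
      rw [hu, List.countP_cons, htail]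
      cases t with
      | nil => simp [hvk, idxOf, hc0, hc1]
      | cons y t' =>
        have hmm : decide ((k + 1) ∈ idxOf v k (x :: y :: t')) = decide (y = v) := by
          rw [hvk]
          simp only [decide_eq_decide]
          rw [mem_idxOf_self]
          constructor
          · rintro ⟨t'', h⟩
            injection h with h1 _
          · intro h
            exact ⟨t', by rw [h]⟩
        rw [hc x y t', hmm]
        by_cases hyv : y = v
        · simp [hxu, hyv]
          omega
        · simp [hxu, hyv]
    · have hu : idxOf u k (x :: t) = idxOf u (k + 1) t := by simp [idxOf, hxu]
      rw [hu, htail]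
      cases t with
      | nil => rw [hc0, hc1]
      | cons y t' =>
        rw [hc x y t']
        simp [hxu]

-- A's loop, characterised
lemma sasl_loop_eq : ∀ (xs : List Int) (p a b c d : Int),
    xs.foldl saslA_body (a, b, c, d, p) =
      (a + (xs.count 0 : Int), b + ((xs.length : Int) - (xs.count 0 : Int)),
       c + (c10 (p :: xs) : Int), d + (c01 (p :: xs) : Int), xs.getLastD p) := by
  intro xs
  induction xs with
  | nil => intro p a b c d; simp [c01, c10]
  | cons x t ih =>
    intro p a b c d
    simp only [List.foldl_cons, List.getLastD_cons]
    rw [ih]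
    clear ih
    simp only [saslA_body, List.count_cons, c01, c10]
    by_cases hx0 : x = 0 <;> by_cases hx1 : x = 1 <;> by_cases hp0 : p = 0 <;> by_cases hp1 : p = 1
    all_goals simp_all [Prod.ext_iff]
    all_goals push_cast
    all_goals omega

-- Python's 'y in s' as a decide
lemma contains_eq_decide (s : PySem.Set Int) (y : Int) :
    PySem.Set.contains s y = decide (y ∈ s) := by
  by_cases h : y ∈ s <;> simp [h]

-- the first pair of A's loop (prev = -1) never fires a transition branch
lemma c01_neg_one (x : Int) (t : List Int) : c01 (-1 :: x :: t) = c01 (x :: t) := by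
  simp [c01]
lemma c10_neg_one (x : Int) (t : List Int) : c10 (-1 :: x :: t) = c10 (x :: t) := by
  simp [c10]

-- ===== VERDICT =====
theorem states_and_segment_spec : Claim_equal_states_and_segment := by
  intro sequence _ hpre
  unfold Spec_states_and_segment
  match sequence, hpre with
  | x :: t, _ =>
    have h01 := countP_idxOf_eq_c01 0 1 (by norm_num) c01 (fun a b l => rfl) (fun a => rfl) rfl
      (x :: t) 0
    have h10 := countP_idxOf_eq_c01 1 0 (by norm_num) c10 (fun a b l => rfl) (fun a => rfl) rfl
      (x :: t) 0
    have hzz : PySem.Set.ofList (idxOf 0 0 (x :: t)) = idxOf 0 0 (x :: t) :=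
      PySem.Set.ofList_eq_self_of_nodup _ (idxOf_nodup 0 (x :: t) 0)
    have hoo : PySem.Set.ofList (idxOf 1 0 (x :: t)) = idxOf 1 0 (x :: t) :=
      PySem.Set.ofList_eq_self_of_nodup _ (idxOf_nodup 1 (x :: t) 0)
    have hcz : (fun i => PySem.Set.contains (idxOf 1 0 (x :: t)) (i + 1))
        = (fun i => decide ((i + 1) ∈ idxOf 1 0 (x :: t))) :=
      funext fun i => contains_eq_decide _ _
    have hco : (fun i => PySem.Set.contains (idxOf 0 0 (x :: t)) (i + 1))
        = (fun i => decide ((i + 1) ∈ idxOf 0 0 (x :: t))) :=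
      funext fun i => contains_eq_decide _ _
    simp only [states_and_segment, states_and_segment_alt,
      filterMap_enumerate_eq_idxOf, hzz, hoo]
    by_cases hs : ((PySem.List.pyGet? (x :: t) 1).getD 0 == 0) = true <;>
      simp only [hs, ite_true, ite_false, Bool.false_eq_true] <;>
      rw [sasl_loop_eq, foldl_count_eq_countP, foldl_count_eq_countP, hcz, hco, h01, h10,
        c01_neg_one, c10_neg_one] <;>
      simp only [PySem.Set.len, idxOf_length, Prod.ext_iff] <;>
      refine ⟨by omega, by omega, by omega, by omega⟩
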